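-- pv_equiv track=rewrite | github.com/ViniGuimaraes/Mathematics | Álgebra/Matrizes/Métodos para o cálculo de determinantes de matrizes/Cálculo de determinantes pelo algoritmo de Sadosky.py | alteracao
-- ===== SOURCE A (Python) =====
-- def alteracao(m, k):
--     k+=1
--     a = []
--     for i in range(len(m)):
--         a.append(m[i][0])
--     for i in range(len(m)):
--         m[i][0] = m[i][1]
--     for i in range(len(m)):
--         m[i][1] = a[i]
--     return m, k
-- ===== SOURCE B (Python) =====
-- def alteracao(m, k):
--     # One pass over the rows, swapping the two columns in place (same mutation of m as A).
--     for row in m: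
--         row[0], row[1] = row[1], row[0]
--     return m, k + 1
-- ===== Notes on version B (the rewrite author's own statement) =====
-- stated objective: simpler
-- what changed: Replaces A's three sequential index loops and the temporary column buffer with a single pass over the rows that swaps the two leading entries of each row with a tuple assignment.
import Mathlib
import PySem

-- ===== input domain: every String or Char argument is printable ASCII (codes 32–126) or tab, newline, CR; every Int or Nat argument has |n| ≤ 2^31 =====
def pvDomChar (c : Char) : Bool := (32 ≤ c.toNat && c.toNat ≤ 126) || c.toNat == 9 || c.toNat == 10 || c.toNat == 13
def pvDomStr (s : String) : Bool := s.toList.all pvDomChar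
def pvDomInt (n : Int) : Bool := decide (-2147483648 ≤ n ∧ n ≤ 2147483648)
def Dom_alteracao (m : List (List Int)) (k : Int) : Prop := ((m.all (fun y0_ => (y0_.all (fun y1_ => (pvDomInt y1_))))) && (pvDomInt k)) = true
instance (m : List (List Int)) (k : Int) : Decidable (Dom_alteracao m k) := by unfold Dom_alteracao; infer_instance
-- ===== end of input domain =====

-- B replaces A's three index loops and temporary buffer with one pass swapping each row's
-- first two entries (objective: simpler). Both Pythons mutate m's rows in place identically;
-- the equivalence proved here is about the return value.

-- ===== PORT A =====
def alteracao (m : List (List Int)) (k : Int) : List (List Int) × Int :=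
  let k := k + 1
  -- a = []; for i in range(len(m)): a.append(m[i][0])
  let a : List Int := (PySem.List.pyRange 0 (PySem.List.len m) 1).foldl
    (fun acc i => acc ++ [PySem.List.pyGetD (PySem.List.pyGetD m i []) 0 0]) []
  -- for i in range(len(m)): m[i][0] = m[i][1]
  let m1 := (PySem.List.pyRange 0 (PySem.List.len m) 1).foldl
    (fun mm i =>
      PySem.List.pySetD mm i
        (PySem.List.pySetD (PySem.List.pyGetD mm i []) 0
          (PySem.List.pyGetD (PySem.List.pyGetD mm i []) 1 0))) m
  -- for i in range(len(m)): m[i][1] = a[i]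
  let m2 := (PySem.List.pyRange 0 (PySem.List.len m) 1).foldl
    (fun mm i =>
      PySem.List.pySetD mm i
        (PySem.List.pySetD (PySem.List.pyGetD mm i []) 1 (PySem.List.pyGetD a i 0))) m1
  (m2, k)

-- ===== PORT B =====
def alteracao_alt (m : List (List Int)) (k : Int) : List (List Int) × Int :=
  (m.map (fun row =>
      let x := PySem.List.pyGetD row 0 0
      let y := PySem.List.pyGetD row 1 0
      PySem.List.pySetD (PySem.List.pySetD row 0 y) 1 x),
   k + 1)

-- ===== PRECONDITION & SPEC =====
-- Pre_ excludes exactly the inputs on which Python A raises IndexError: a row with fewer than 2 entries.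
def Pre_alteracao (m : List (List Int)) (k : Int) : Prop := ∀ row ∈ m, 2 ≤ row.length
instance (m : List (List Int)) (k : Int) : Decidable (Pre_alteracao m k) := by unfold Pre_alteracao; infer_instance
def pvWitness_alteracao : List (List Int) × Int := ([[1, 2], [3, 4]], 0)

def Spec_alteracao (m : List (List Int)) (k : Int) (out : List (List Int) × Int) : Prop := out = alteracao_alt m k
instance (m : List (List Int)) (k : Int) (out : List (List Int) × Int) : Decidable (Spec_alteracao m k out) := by unfold Spec_alteracao; infer_instance

-- ===== CLAIM (what is proved, stated in full; the proofs are below) =====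
def Claim_equal_alteracao : Prop := ∀ (m : List (List Int)) (k : Int), Dom_alteracao m k → Pre_alteracao m k → Spec_alteracao m k (alteracao m k)

-- ===== LEMMAS AND PROOFS =====

/-- An index loop `for j: mm[j] = f j mm[j]` over a suffix rewrites exactly that suffix,
entry by entry. -/
lemma setFold (f : Nat → List Int → List Int) :
    ∀ (m pre : List (List Int)),
      (List.range' pre.length m.length 1).foldl
        (fun mm j => mm.set j (f j (mm.getD j []))) (pre ++ m)
      = pre ++ m.mapIdx (fun idx r => f (pre.length + idx) r) := by
  intro m
  induction m with
  | nil => intro pre; simp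
  | cons r rest ih =>
    intro pre
    have hlen : (List.range' pre.length (r :: rest).length 1)
        = pre.length :: List.range' (pre.length + 1) rest.length 1 := by
      simp [List.range'_succ]
    rw [hlen]
    simp only [List.foldl_cons]
    have hget : (pre ++ r :: rest).getD pre.length [] = r := by
      simp [List.getD]
    have hset : (pre ++ r :: rest).set pre.length (f pre.length r)
        = (pre ++ [f pre.length r]) ++ rest := by
      rw [List.set_append_right _ _ (le_refl _)]
      simp
    rw [hget, hset]
    have hpl : (pre ++ [f pre.length r]).length = pre.length + 1 := by simp
    have := ih (pre ++ [f pre.length r])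
    rw [hpl] at this
    rw [this]
    simp [List.mapIdx_cons, Nat.add_assoc, Nat.add_comm 1]

lemma setFold_zero (f : Nat → List Int → List Int) (m : List (List Int)) :
    (List.range' 0 m.length 1).foldl
      (fun mm j => mm.set j (f j (mm.getD j []))) m
    = m.mapIdx (fun idx r => f idx r) := by
  have := setFold f m []
  simpa using this

lemma pyRange_len_foldl (g : List (List Int) → Int → List (List Int))
    (g' : List (List Int) → Nat → List (List Int)) (m init : List (List Int))
    (h : ∀ mm (j : Nat), g mm (j : Int) = g' mm j) :
    (PySem.List.pyRange 0 (PySem.List.len m) 1).foldl g init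
    = (List.range m.length).foldl g' init := by
  rw [PySem.List.len_eq, PySem.List.pyRange_zero_nat, List.foldl_map]
  rw [show (fun mm (j : Nat) => g mm (j : Int)) = g' from funext fun mm => funext fun j => h mm j]

/-- mapIdx where the function looks the element up in the original list by its index. -/
lemma mapIdx_getD_self (F : List Int → List Int → List Int) (m : List (List Int)) :
    m.mapIdx (fun j r => F (m.getD j []) r) = m.map (fun r => F r r) := by
  apply List.ext_getElem
  · simp
  · intro i h1 h2
    simp only [List.getElem_mapIdx, List.getElem_map]
    congr 1
    exact List.getD_eq_getElem m [] (by simpa using h1)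

theorem alteracao_spec : Claim_equal_alteracao := by
  unfold Claim_equal_alteracao
  intro m k _ _
  unfold Spec_alteracao alteracao alteracao_alt
  simp only []
  -- loop 1: a = the list of first entries
  have ha : (PySem.List.pyRange 0 (PySem.List.len m) 1).foldl
      (fun acc i => acc ++ [PySem.List.pyGetD (PySem.List.pyGetD m i []) 0 0]) ([] : List Int)
      = (List.range m.length).map (fun j => (m.getD j []).getD 0 0) := by
    rw [PySem.List.foldl_append_singleton_eq_map, PySem.List.len_eq,
        PySem.List.pyRange_zero_nat, List.map_map]
    simp [Function.comp, PySem.List.pyGetD_zero]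
  rw [ha]
  -- loop 2
  have h2 : (PySem.List.pyRange 0 (PySem.List.len m) 1).foldl
      (fun mm i =>
        PySem.List.pySetD mm i
          (PySem.List.pySetD (PySem.List.pyGetD mm i []) 0
            (PySem.List.pyGetD (PySem.List.pyGetD mm i []) 1 0))) m
      = m.map (fun r => r.set 0 (r.getD 1 0)) := by
    rw [pyRange_len_foldl _
        (fun mm j => mm.set j ((fun _ r => r.set 0 (r.getD 1 0)) j (mm.getD j []))) m m
        (by intro mm j; simp [pysem]), List.range_eq_range']
    exact (setFold_zero (fun _ r => r.set 0 (r.getD 1 0)) m).trans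
      (mapIdx_getD_self (fun _ r => r.set 0 (r.getD 1 0)) m)
  rw [h2]
  -- loop 3 (on m1 := m.map swap0, same length as m)
  set a := (List.range m.length).map (fun j => (m.getD j []).getD 0 0) with hadef
  set m1 := m.map (fun r => r.set 0 (r.getD 1 0)) with hm1
  have hlen1 : m1.length = m.length := by simp [hm1]
  have h3 : (PySem.List.pyRange 0 (PySem.List.len m) 1).foldl
      (fun mm i =>
        PySem.List.pySetD mm i
          (PySem.List.pySetD (PySem.List.pyGetD mm i []) 1 (PySem.List.pyGetD a i 0))) m1
      = m1.mapIdx (fun j r => r.set 1 (a.getD j 0)) := by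
    rw [pyRange_len_foldl _
        (fun mm j => mm.set j ((fun j r => r.set 1 (a.getD j 0)) j (mm.getD j []))) m m1
        (by intro mm j; simp [pysem])]
    rw [← hlen1, List.range_eq_range']
    exact setFold_zero (fun j r => r.set 1 (a.getD j 0)) m1
  rw [h3]
  -- combine: index j of m1 is (swap0 m[j]); a.getD j 0 is m[j].getD 0 0
  simp only [Prod.mk.injEq]
  refine ⟨?_, trivial⟩
  apply List.ext_getElem
  · simp [hm1]
  · intro i h1 h2'
    have him : i < m.length := by simpa [hm1] using h1
    simp only [List.getElem_mapIdx, List.getElem_map, hm1]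
    have hai : a.getD i 0 = (m[i]).getD 0 0 := by
      rw [hadef]
      rw [List.getD_eq_getElem _ 0 (by simpa using him)]
      simp [List.getElem?_eq_getElem him]
    rw [hai]
    simp [pysem]
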